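-- pv_equiv track=rewrite | github.com/chipsalliance/Cores-VeeR-EL2 | verification/block/common/csrs.py | _prevent_11_pairs
-- ===== SOURCE A (Python) =====
-- def get_bit(value, i):
--     return (value >> i) & 1
--
-- def _prevent_11_pairs(value):
--     new_value = 0
--     for i in reversed(range(0, 31, 2)):
--         new_value = new_value << 2
--         b0 = get_bit(value, i)
--         b1 = get_bit(value, i + 1)
--         new_value |= (b1 << 1) | (b0 & (not b1))
--     return new_value
-- ===== SOURCE B (Python) =====
-- def _prevent_11_pairs(value):
--     # closed-form bitwise version: keep all odd bits; keep an even bit only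
--     # when the adjacent odd bit (above it) is clear
--     odd = value & 0xAAAAAAAA
--     return odd | (value & 0x55555555 & ~(odd >> 1))
-- ===== Notes on version B (the rewrite author's own statement) =====
-- stated objective: idiomatic
-- what changed: Replaced A's loop over the bit-pairs (shift the accumulator, extract two bits, recombine per pair) by a single closed-form bitwise expression: keep the odd-position bits and keep an even-position bit only when the odd bit above it is clear.
import Mathlib
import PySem

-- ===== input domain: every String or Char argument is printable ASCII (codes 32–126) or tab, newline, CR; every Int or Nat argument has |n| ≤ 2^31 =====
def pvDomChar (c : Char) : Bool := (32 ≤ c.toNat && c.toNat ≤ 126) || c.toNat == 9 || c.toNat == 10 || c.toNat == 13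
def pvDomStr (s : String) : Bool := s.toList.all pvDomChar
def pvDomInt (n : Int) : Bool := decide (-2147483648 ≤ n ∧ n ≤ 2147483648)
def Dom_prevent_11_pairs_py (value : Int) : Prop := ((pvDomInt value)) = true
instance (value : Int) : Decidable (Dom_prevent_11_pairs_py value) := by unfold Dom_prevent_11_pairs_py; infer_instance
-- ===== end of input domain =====

-- B replaces A's 16-iteration per-pair loop by one closed-form bitwise expression (idiomatic, word-parallel).

-- ===== PORT A =====
-- get_bit(value, i) = (value >> i) & 1 ; exact for the nonnegative i _prevent_11_pairs passes it
def get_bit (value : Int) (i : Int) : Int :=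
  PySem.Int.band (value >>> i.toNat) 1

def prevent_11_pairs_py (value : Int) : Int :=
  ((PySem.List.pyRange 0 31 2).reverse).foldl
    (fun new_value i =>
      let nv := new_value <<< (2 : Nat)
      let b0 := get_bit value i
      let b1 := get_bit value (i + 1)
      PySem.Int.bor nv (PySem.Int.bor (b1 <<< (1 : Nat))
        (PySem.Int.band b0 (if b1 == 0 then 1 else 0))))
    0

-- ===== PORT B =====
def prevent_11_pairs_py_alt (value : Int) : Int :=
  let odd := PySem.Int.band value 0xAAAAAAAA
  PySem.Int.bor odd
    (PySem.Int.band (PySem.Int.band value 0x55555555) (Int.not (odd >>> (1 : Nat))))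

-- ===== PRECONDITION & SPEC =====
def Spec_prevent_11_pairs_py (value : Int) (out : Int) : Prop := out = prevent_11_pairs_py_alt value
instance (value : Int) (out : Int) : Decidable (Spec_prevent_11_pairs_py value out) := by unfold Spec_prevent_11_pairs_py; infer_instance

-- ===== CLAIM (what is proved, stated in full; the proofs are below) =====
def Claim_equal_prevent_11_pairs_py : Prop := ∀ (value : Int), Dom_prevent_11_pairs_py value → Spec_prevent_11_pairs_py value (prevent_11_pairs_py value)

-- ===== LEMMAS AND PROOFS =====

-- Nat: removing the bits shared with n is the bitwise difference
theorem pv_sub_land (m n : Nat) : m - (m &&& n) = Nat.ldiff m n := by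
  induction m using Nat.binaryRec generalizing n with
  | zero => apply Nat.eq_of_testBit_eq; intro j; simp [Nat.testBit_ldiff]
  | bit a m ih =>
    rw [← Nat.bit_testBit_zero_shiftRight_one n, Nat.land_bit, Nat.ldiff_bit]
    have h1 := ih (n >>> 1)
    have h2 : m &&& (n >>> 1) ≤ m := Nat.and_le_left
    cases a <;> cases hb : n.testBit 0 <;>
      simp only [Nat.bit_val, Bool.toNat, Bool.and_self, Bool.and_false, Bool.and_true,
        Bool.not_false, Bool.not_true, cond_true, cond_false] <;>
      omega

theorem pv_neg_sub_one (n : Nat) : (-(Int.negSucc n) - 1) = (n : Int) := by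
  simp [Int.negSucc_eq]

theorem pv_ldiff_one (k : Nat) : Nat.ldiff 1 k = if k.testBit 0 then 0 else 1 := by
  apply Nat.eq_of_testBit_eq
  intro j
  rw [Nat.testBit_ldiff]
  cases j with
  | zero => cases hb : k.testBit 0 <;> simp [hb]
  | succ j =>
    have h1 : Nat.testBit 1 (j+1) = false :=
      Nat.testBit_lt_two_pow (by have := Nat.one_lt_two_pow_iff (n := j+1); omega)
    rw [h1]
    cases hb : k.testBit 0 <;> simp [h1]

-- Python & of a negative and a nonnegative int, in Nat terms
theorem pv_band_negSucc_natCast (n m : Nat) :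
    PySem.Int.band (Int.negSucc n) (m : Int) = (Nat.ldiff m n : Int) := by
  rw [← pv_sub_land]
  unfold PySem.Int.band
  rw [if_neg (by omega), if_pos (by omega)]
  norm_num [pv_neg_sub_one]

theorem pv_band_natCast_negSucc (m n : Nat) :
    PySem.Int.band (m : Int) (Int.negSucc n) = (Nat.ldiff m n : Int) := by
  rw [← pv_sub_land]
  unfold PySem.Int.band
  rw [if_pos (by omega), if_neg (by omega)]
  norm_num [pv_neg_sub_one]

-- (value >> i) & 1 extracts bit i, for any sign of value
theorem pv_get_bit (v : Int) (i : Nat) :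
    get_bit v (i : Int) = if v.testBit i then 1 else 0 := by
  unfold get_bit
  rw [Int.toNat_natCast]
  cases v with
  | ofNat n =>
    have hsr : (Int.ofNat n) >>> i = Int.ofNat (n >>> i) := rfl
    rw [hsr]
    have hb : PySem.Int.band (Int.ofNat (n >>> i)) 1 = (((n >>> i) &&& 1 : Nat) : Int) := by
      exact_mod_cast PySem.Int.band_natCast (n >>> i) 1
    rw [hb, Nat.and_one_is_mod]
    have ht : (Int.ofNat n).testBit i = n.testBit i := rfl
    have ht2 : n.testBit i = (n >>> i).testBit 0 := by
      rw [Nat.testBit_shiftRight]; simp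
    rw [ht, ht2, Nat.testBit_zero]
    rcases Nat.mod_two_eq_zero_or_one (n >>> i) with h | h <;> simp [h]
  | negSucc n =>
    have hsr : (Int.negSucc n) >>> i = Int.negSucc (n >>> i) := rfl
    rw [hsr]
    have h1 : PySem.Int.band (Int.negSucc (n >>> i)) ((1:Nat) : Int) = (Nat.ldiff 1 (n >>> i) : Int) :=
      pv_band_negSucc_natCast (n >>> i) 1
    norm_num at h1
    rw [h1, pv_ldiff_one]
    have ht : (Int.negSucc n).testBit i = !(n.testBit i) := rfl
    rw [ht]
    have h2 : (n >>> i).testBit 0 = n.testBit i := by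
      rw [Nat.testBit_shiftRight]; simp
    rw [h2]
    cases hb : n.testBit i <;> simp

-- or-ing a two-bit value into a left-shifted accumulator is addition
theorem pv_lor4 (x y : Nat) (h : y < 4) : 4*x ||| y = 4*x + y := by
  apply Nat.eq_of_testBit_eq
  intro j
  have h4 : 4*x = 2^2 * x := by ring
  rw [Nat.testBit_lor, h4, Nat.testBit_two_pow_mul_add x (by omega) j]
  have hx : (2^2 * x).testBit j = (decide (j ≥ 2) && x.testBit (j - 2)) := by
    rw [show 2^2 * x = x <<< 2 by rw [Nat.shiftLeft_eq]; ring, Nat.testBit_shiftLeft]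
  rw [hx]
  by_cases hj : j < 2
  · simp [hj]
  · have hyf : y.testBit j = false := Nat.testBit_lt_two_pow (by
      have : 2^2 ≤ 2^j := Nat.pow_le_pow_right (by omega) (by omega)
      omega)
    simp [hj, hyf, show j ≥ 2 by omega]

-- value of the output pair at bit positions (2k, 2k+1)
def pvW (v : Int) (k : Nat) : Nat :=
  if v.testBit (2*k+1) then 2 else if v.testBit (2*k) then 1 else 0

-- the output restricted to the lowest m pairs
def pvS (v : Int) : Nat → Nat
  | 0 => 0
  | m+1 => pvW v m * 4^m + pvS v m

-- the descending list of even indices [2(m-1), …, 2, 0]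
def pvDl : Nat → List Int
  | 0 => []
  | m+1 => ((2*m : Nat) : Int) :: pvDl m

theorem pvW_lt (v : Int) (k : Nat) : pvW v k < 4 := by
  unfold pvW; split_ifs <;> omega

theorem pvS_lt (v : Int) (m : Nat) : pvS v m < 4^m := by
  induction m with
  | zero => simp [pvS]
  | succ m ih =>
    have h1 := pvW_lt v m
    have h2 : pvW v m * 4^m ≤ 3 * 4^m := Nat.mul_le_mul_right _ (by omega)
    simp only [pvS, pow_succ]
    omega

theorem pv_dl16 : (PySem.List.pyRange 0 31 2).reverse = pvDl 16 := by decide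

theorem pv_bor_shift (a w : Nat) (h : w < 4) :
    PySem.Int.bor (((a:Nat):Int) <<< (2:Nat)) ((w:Nat):Int) = ((4*a + w : Nat):Int) := by
  have h1 : ((a:Nat):Int) <<< (2:Nat) = ((a <<< 2 : Nat) : Int) := rfl
  rw [h1, PySem.Int.bor_natCast, Nat.shiftLeft_eq, show a * 2^2 = 4*a by ring, pv_lor4 _ _ h]

-- one iteration of A's loop, at pair k, appends the pair value pvW v k
theorem pv_step (v : Int) (a k : Nat) :
    PySem.Int.bor (((a:Nat):Int) <<< (2:Nat))
      (PySem.Int.bor ((get_bit v (((2*k:Nat):Int) + 1)) <<< (1:Nat))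
        (PySem.Int.band (get_bit v ((2*k:Nat):Int))
          (if get_bit v (((2*k:Nat):Int) + 1) == 0 then 1 else 0)))
      = ((4*a + pvW v k : Nat) : Int) := by
  have hc : ((2*k:Nat):Int) + 1 = ((2*k+1:Nat):Int) := by push_cast; ring
  rw [hc, pv_get_bit, pv_get_bit]
  unfold pvW
  rcases hb1 : v.testBit (2*k+1) <;> rcases hb0 : v.testBit (2*k) <;>
    simp only [Bool.false_eq_true, if_true, if_false]
  · rw [← pv_bor_shift a 0 (by omega)]; congr 1
  · rw [← pv_bor_shift a 1 (by omega)]; congr 1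
  · rw [← pv_bor_shift a 2 (by omega)]; congr 1
  · rw [← pv_bor_shift a 2 (by omega)]; congr 1

-- invariant of A's loop over the descending index list
theorem pv_foldl_dl (v : Int) : ∀ (m : Nat) (a : Nat),
    List.foldl
      (fun (new_value : Int) (i : Int) =>
        let nv := new_value <<< (2 : Nat)
        let b0 := get_bit v i
        let b1 := get_bit v (i + 1)
        PySem.Int.bor nv (PySem.Int.bor (b1 <<< (1 : Nat))
          (PySem.Int.band b0 (if b1 == 0 then 1 else 0))))
      ((a:Nat):Int) (pvDl m) = ((a * 4^m + pvS v m : Nat) : Int) := by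
  intro m
  induction m with
  | zero => intro a; simp [pvDl, pvS]
  | succ m ih =>
    intro a
    simp only [pvDl, List.foldl_cons]
    rw [show (4:Nat)^(m+1) = 4^m*4 by ring]
    have hstep := pv_step v a m
    rw [hstep, ih (4*a + pvW v m)]
    congr 1
    simp [pvS]
    ring

theorem pv_A_eq (v : Int) : prevent_11_pairs_py v = ((pvS v 16 : Nat) : Int) := by
  unfold prevent_11_pairs_py
  rw [pv_dl16]
  have h := pv_foldl_dl v 16 0
  rw [show (0:Nat)*4^16 + pvS v 16 = pvS v 16 by ring] at h
  rw [Nat.cast_zero] at h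
  exact h

-- bit j of the pair-sum is the matching bit of the pair at position j/2
theorem pv_S_testBit (v : Int) (m j : Nat) :
    (pvS v m).testBit j = if j < 2*m then (pvW v (j/2)).testBit (j%2) else false := by
  induction m generalizing j with
  | zero => simp [pvS]
  | succ m ih =>
    have hlt : pvS v m < 2^(2*m) := by
      have := pvS_lt v m
      rwa [show (4:Nat)^m = 2^(2*m) by rw [pow_mul]; norm_num] at this
    have hrw : pvS v (m+1) = 2^(2*m) * pvW v m + pvS v m := by
      simp [pvS, show (4:Nat)^m = 2^(2*m) by rw [pow_mul]; norm_num]; ring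
    rw [hrw, Nat.testBit_two_pow_mul_add _ hlt]
    by_cases h1 : j < 2*m
    · rw [if_pos h1, ih, if_pos h1, if_pos (by omega)]
    · rw [if_neg h1]
      by_cases h2 : j < 2*(m+1)
      · rw [if_pos h2]
        have hj2 : j / 2 = m := by omega
        have hj3 : j - 2*m = j % 2 := by omega
        rw [hj2, hj3]
      · rw [if_neg h2]
        apply Nat.testBit_lt_two_pow
        have h4 := pvW_lt v m
        have : 2^2 ≤ 2^(j - 2*m) := Nat.pow_le_pow_right (by omega) (by omega)
        omega

theorem pv_maskA_testBit (j : Nat) :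
    Nat.testBit 0xAAAAAAAA j = (decide (j < 32) && decide (j % 2 = 1)) := by
  by_cases h : j < 32
  · interval_cases j <;> decide
  · have hf : Nat.testBit 0xAAAAAAAA j = false := Nat.testBit_lt_two_pow (by
      have : (2:Nat)^32 ≤ 2^j := Nat.pow_le_pow_right (by omega) (by omega)
      omega)
    simp [hf, h]

theorem pv_maskE_testBit (j : Nat) :
    Nat.testBit 0x55555555 j = (decide (j < 32) && decide (j % 2 = 0)) := by
  by_cases h : j < 32
  · interval_cases j <;> decide
  · have hf : Nat.testBit 0x55555555 j = false := Nat.testBit_lt_two_pow (by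
      have : (2:Nat)^32 ≤ 2^j := Nat.pow_le_pow_right (by omega) (by omega)
      omega)
    simp [hf, h]

-- the closed-form combination of odd and surviving even bits equals the pair-sum
theorem pv_key (v : Int) (oddN evenN : Nat)
    (hodd : ∀ j, oddN.testBit j = (v.testBit j && (decide (j < 32) && decide (j % 2 = 1))))
    (heven : ∀ j, evenN.testBit j = (v.testBit j && (decide (j < 32) && decide (j % 2 = 0)))) :
    oddN ||| Nat.ldiff evenN (oddN >>> 1) = pvS v 16 := by
  apply Nat.eq_of_testBit_eq
  intro j
  rw [Nat.testBit_lor, Nat.testBit_ldiff, Nat.testBit_shiftRight, hodd, heven, hodd,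
    pv_S_testBit]
  by_cases hj : j < 32
  · rcases Nat.mod_two_eq_zero_or_one j with hp | hp
    · have h1 : 2*(j/2) = j := by omega
      have h3 : 1 + j = j + 1 := by omega
      rw [if_pos (by omega), hp]
      unfold pvW
      rw [h1, h3]
      have h5 : j + 1 < 32 := by omega
      rcases hb1 : v.testBit (j+1) <;> rcases hb0 : v.testBit j <;>
        simp [hj, h5, show (j+1) % 2 = 1 by omega]
    · have h1 : 2*(j/2)+1 = j := by omega
      rw [if_pos (by omega), hp]
      unfold pvW
      rw [h1]
      rcases hb1 : v.testBit j <;> rcases hb0 : v.testBit (2*(j/2)) <;> simp [hj, hp] <;> decide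
  · rw [if_neg (by omega)]
    simp [hj]

theorem pv_B_eq (v : Int) : prevent_11_pairs_py_alt v = ((pvS v 16 : Nat) : Int) := by
  rw [show prevent_11_pairs_py_alt v
      = PySem.Int.bor (PySem.Int.band v 0xAAAAAAAA)
          (PySem.Int.band (PySem.Int.band v 0x55555555)
            (Int.not ((PySem.Int.band v 0xAAAAAAAA) >>> (1:Nat)))) from rfl]
  have hAm : (0xAAAAAAAA : Int) = ((0xAAAAAAAA : Nat) : Int) := by norm_num
  have hEm : (0x55555555 : Int) = ((0x55555555 : Nat) : Int) := by norm_num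
  cases v with
  | ofNat n =>
    have h1 : PySem.Int.band (Int.ofNat n) 0xAAAAAAAA = ((n &&& 0xAAAAAAAA : Nat) : Int) := by
      rw [hAm]; exact_mod_cast PySem.Int.band_natCast n 0xAAAAAAAA
    have h2 : PySem.Int.band (Int.ofNat n) 0x55555555 = ((n &&& 0x55555555 : Nat) : Int) := by
      rw [hEm]; exact_mod_cast PySem.Int.band_natCast n 0x55555555
    rw [h1, h2]
    have h3 : ((( (n &&& 0xAAAAAAAA : Nat) : Int)) >>> (1:Nat)) = (((n &&& 0xAAAAAAAA) >>> 1 : Nat) : Int) := rfl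
    rw [h3]
    have h4 : Int.not ((((n &&& 0xAAAAAAAA) >>> 1 : Nat)) : Int) = Int.negSucc ((n &&& 0xAAAAAAAA) >>> 1) := rfl
    rw [h4, pv_band_natCast_negSucc, PySem.Int.bor_natCast]
    refine congrArg (fun x : Nat => (x : Int)) (pv_key _ _ _ ?_ ?_)
    · intro j; simp only [Nat.testBit_land, pv_maskA_testBit]; rfl
    · intro j; simp only [Nat.testBit_land, pv_maskE_testBit]; rfl
  | negSucc n =>
    rw [hAm, hEm, pv_band_negSucc_natCast, pv_band_negSucc_natCast]
    have h3 : (((Nat.ldiff 0xAAAAAAAA n : Nat) : Int)) >>> (1:Nat) = (((Nat.ldiff 0xAAAAAAAA n) >>> 1 : Nat) : Int) := rfl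
    rw [h3]
    have h4 : Int.not (((Nat.ldiff 0xAAAAAAAA n >>> 1 : Nat)) : Int) = Int.negSucc (Nat.ldiff 0xAAAAAAAA n >>> 1) := rfl
    rw [h4, pv_band_natCast_negSucc, PySem.Int.bor_natCast]
    refine congrArg (fun x : Nat => (x : Int)) (pv_key _ _ _ ?_ ?_)
    · intro j
      simp only [Nat.testBit_ldiff, pv_maskA_testBit]
      have ht : (Int.negSucc n).testBit j = !(n.testBit j) := rfl
      rw [ht]
      rcases n.testBit j <;> simp
    · intro j
      simp only [Nat.testBit_ldiff, pv_maskE_testBit]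
      have ht : (Int.negSucc n).testBit j = !(n.testBit j) := rfl
      rw [ht]
      rcases n.testBit j <;> simp

-- ===== VERDICT (by name: the statement is the Claim_ definition above) =====
theorem prevent_11_pairs_py_spec : Claim_equal_prevent_11_pairs_py := by
  intro value _
  unfold Spec_prevent_11_pairs_py
  rw [pv_A_eq, pv_B_eq]
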